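-- pv_equiv track=rewrite | github.com/KiaOnigiri/Python | python/Олимпиада/D/D.py | bliz
-- ===== SOURCE A (Python) =====
-- def bliz(x,y):
--     if len(x)>len(y):
--         x,y=y,x
--     c=1
--     while c<len(x)+1:
--         b=x[0:c]
--         if y.find(b)==0:
--             c+=1
--         else:
--             break
--     c-=1
--     x=x[c:]
--     x=x[::-1]
--     y=y[::-1]
--     s=1
--     while s<len(x)+1:
--         b=x[0:s]
--         if y.find(b)==0:
--             s+=1
--         else:
--             break
--     s-=1
--     return c+s
-- ===== SOURCE B (Python) =====
-- def bliz(x, y):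
--     if len(x) > len(y):
--         x, y = y, x
--     p = 0
--     while p < len(x) and x[p] == y[p]:
--         p += 1
--     s = 0
--     while s < len(x) - p and x[len(x) - 1 - s] == y[len(y) - 1 - s]:
--         s += 1
--     return p + s
-- ===== Notes on version B (the rewrite author's own statement) =====
-- stated objective: faster
-- what changed: Replaces A's repeated slice-building plus substring search (y.find(x[0:c])) in both while loops by direct index-by-index character comparison for the common prefix and common suffix.
import Mathlib
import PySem

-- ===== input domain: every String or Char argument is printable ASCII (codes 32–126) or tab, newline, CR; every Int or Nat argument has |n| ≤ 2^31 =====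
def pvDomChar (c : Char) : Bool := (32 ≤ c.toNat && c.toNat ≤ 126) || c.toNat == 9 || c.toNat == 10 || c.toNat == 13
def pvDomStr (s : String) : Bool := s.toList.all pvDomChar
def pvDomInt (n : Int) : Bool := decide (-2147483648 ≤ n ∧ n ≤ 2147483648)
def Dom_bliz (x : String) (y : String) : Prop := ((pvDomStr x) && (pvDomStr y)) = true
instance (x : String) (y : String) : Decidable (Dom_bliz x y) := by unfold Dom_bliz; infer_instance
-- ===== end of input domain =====

-- B replaces A's quadratic slice-and-find prefix/suffix search by direct character-by-character scans (objective: faster).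


-- ===== PORT A =====
-- A's 'while c < len(x)+1: b = x[0:c]; if y.find(b)==0: c += 1 else: break' loop
def blizLoop (xs ys : List Char) (c : Nat) : Nat :=
  if c < xs.length + 1 then
    if PySem.Chars.find ys (PySem.List.slice xs (some 0) (some (c : Int))) = 0 then
      blizLoop xs ys (c + 1)
    else c
  else c
termination_by xs.length + 1 - c

def bliz (x : String) (y : String) : Int :=
  -- if len(x) > len(y): x, y = y, x
  let a := if x.toList.length > y.toList.length then y.toList else x.toList
  let b := if x.toList.length > y.toList.length then x.toList else y.toList
  let c := blizLoop a b 1 - 1            -- first while, then c -= 1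
  let xr := (PySem.List.slice a (some (c : Int)) none).reverse  -- x = x[c:]; x = x[::-1]  (reverse is exact: PySem.List.slice?_none_none_neg_one)
  let yr := b.reverse                     -- y = y[::-1]
  let s := blizLoop xr yr 1 - 1          -- second while, then s -= 1
  (c : Int) + (s : Int)

-- ===== PORT B =====
-- B's 'while p < len(x) and x[p] == y[p]: p += 1'
def pfxLoop (xs ys : List Char) (p : Nat) : Nat :=
  if h : p < xs.length ∧ PySem.List.pyGetD xs (p : Int) ' ' = PySem.List.pyGetD ys (p : Int) ' ' then
    pfxLoop xs ys (p + 1)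
  else p
termination_by xs.length - p

-- B's 'while s < len(x) - p and x[len(x)-1-s] == y[len(y)-1-s]: s += 1'
def sfxLoop (xs ys : List Char) (p s : Nat) : Nat :=
  if h : s < xs.length - p ∧
      PySem.List.pyGetD xs ((xs.length - 1 - s : Nat) : Int) ' ' =
      PySem.List.pyGetD ys ((ys.length - 1 - s : Nat) : Int) ' ' then
    sfxLoop xs ys p (s + 1)
  else s
termination_by xs.length - p - s

def bliz_alt (x : String) (y : String) : Int :=
  let a := if x.toList.length > y.toList.length then y.toList else x.toList
  let b := if x.toList.length > y.toList.length then x.toList else y.toList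
  let p := pfxLoop a b 0
  let s := sfxLoop a b p 0
  (p : Int) + (s : Int)

-- ===== PRECONDITION & SPEC =====
def Spec_bliz (x : String) (y : String) (out : Int) : Prop := out = bliz_alt x y
instance (x : String) (y : String) (out : Int) : Decidable (Spec_bliz x y out) := by unfold Spec_bliz; infer_instance

-- ===== CLAIM (what is proved, stated in full; the proofs are below) =====
def Claim_equal_bliz : Prop := ∀ (x : String) (y : String), Dom_bliz x y → Spec_bliz x y (bliz x y)

-- ===== LEMMAS AND PROOFS =====

-- length of the longest common prefix (proof-side characterisation of both loops)
def cp : List Char → List Char → Nat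
  | a :: as, b :: bs => if a = b then cp as bs + 1 else 0
  | _, _ => 0

theorem cp_le_left : ∀ (a b : List Char), cp a b ≤ a.length := by
  intro a
  induction a with
  | nil => intro b; cases b <;> simp [cp]
  | cons x as ih =>
    intro b
    cases b with
    | nil => simp [cp]
    | cons y bs =>
      by_cases h : x = y <;> simp [cp, h]
      exact ih bs

theorem take_prefix_iff : ∀ (a b : List Char) (c : Nat), c ≤ a.length → a.length ≤ b.length →
    (a.take c <+: b ↔ c ≤ cp a b) := by
  intro a
  induction a with
  | nil =>
    intro b c hc _
    have hc0 : c = 0 := by simpa using hc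
    subst hc0
    simp
  | cons x as ih =>
    intro b c hc hab
    cases b with
    | nil => simp at hab
    | cons y bs =>
      cases c with
      | zero => simp
      | succ c =>
        by_cases hxy : x = y
        · subst hxy
          rw [show cp (x :: as) (x :: bs) = cp as bs + 1 from by simp [cp]]
          simp only [List.take_succ_cons, List.cons_prefix_cons, true_and]
          rw [ih bs c (by simpa using hc) (by simpa using hab)]
          omega
        · simp [List.cons_prefix_cons, cp, hxy]

theorem find_eq_zero_iff (s sub : List Char) : PySem.Chars.find s sub = 0 ↔ sub <+: s := by
  constructor
  · intro h
    have h0 : 0 ≤ PySem.Chars.find s sub := by rw [h]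
    have := (PySem.Chars.find_spec h0).1
    rwa [h] at this
    
  · intro h
    have h0 : 0 ≤ PySem.Chars.find s sub :=
      (PySem.Chars.find_nonneg_iff s sub).mpr h.isInfix
    have hs := PySem.Chars.find_spec h0
    by_contra hne
    have hpos : 0 < (PySem.Chars.find s sub).toNat := by omega
    exact hs.2 0 hpos (by simpa using h)

theorem find_guard (a b : List Char) (hab : a.length ≤ b.length) (c : Nat) (hle : c ≤ a.length) :
    (PySem.Chars.find b (PySem.List.slice a (some 0) (some (c : Int))) = 0) ↔ c ≤ cp a b := by
  rw [PySem.List.slice_zero_start, PySem.List.slice_to_natCast, find_eq_zero_iff]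
  exact take_prefix_iff a b c hle hab

theorem blizLoop_eq (a b : List Char) (hab : a.length ≤ b.length) :
    ∀ (n c : Nat), cp a b + 1 - c ≤ n → c ≤ cp a b + 1 → blizLoop a b c = cp a b + 1 := by
  intro n
  induction n with
  | zero =>
    intro c hn hc
    have hceq : c = cp a b + 1 := by omega
    subst hceq
    rw [blizLoop]
    by_cases hg : cp a b + 1 < a.length + 1
    · rw [if_pos hg]
      have hle : cp a b + 1 ≤ a.length := by omega
      rw [if_neg (by rw [find_guard a b hab (cp a b + 1) hle]; omega)]
    · rw [if_neg hg]
  | succ n ih =>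
    intro c hn hc
    by_cases hcp : c ≤ cp a b
    · have hlen : c ≤ a.length := le_trans hcp (cp_le_left a b)
      rw [blizLoop, if_pos (by omega)]
      rw [if_pos ((find_guard a b hab c hlen).mpr hcp)]
      exact ih (c + 1) (by omega) (by omega)
    · have hceq : c = cp a b + 1 := by omega
      subst hceq
      rw [blizLoop]
      by_cases hg : cp a b + 1 < a.length + 1
      · rw [if_pos hg]
        have hle : cp a b + 1 ≤ a.length := by omega
        rw [if_neg (by rw [find_guard a b hab (cp a b + 1) hle]; omega)]
      · rw [if_neg hg]

theorem pfxLoop_eq (a b : List Char) (hab : a.length ≤ b.length) :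
    ∀ (n p : Nat), a.length - p ≤ n → pfxLoop a b p = p + cp (a.drop p) (b.drop p) := by
  intro n
  induction n with
  | zero =>
    intro p hn
    have hp : a.length ≤ p := by omega
    rw [pfxLoop, dif_neg (by omega)]
    rw [List.drop_eq_nil_of_le hp]
    simp [cp]
  | succ n ih =>
    intro p hn
    by_cases hp : p < a.length
    · have hpb : p < b.length := lt_of_lt_of_le hp hab
      have hga : PySem.List.pyGetD a (p : Int) ' ' = a[p] := by
        simp [PySem.List.pyGetD_natCast, hp]
      have hgb : PySem.List.pyGetD b (p : Int) ' ' = b[p] := by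
        simp [PySem.List.pyGetD_natCast, hpb]
      have hda : a.drop p = a[p] :: a.drop (p + 1) := List.drop_eq_getElem_cons hp
      have hdb : b.drop p = b[p] :: b.drop (p + 1) := List.drop_eq_getElem_cons hpb
      by_cases heq : a[p] = b[p]
      · rw [pfxLoop, dif_pos ⟨hp, by rw [hga, hgb, heq]⟩]
        rw [ih (p + 1) (by omega)]
        rw [hda, hdb]
        simp [cp, heq]
        omega
      · rw [pfxLoop, dif_neg (by rw [hga, hgb]; exact fun h => heq h.2)]
        rw [hda, hdb]
        simp [cp, heq]
    · rw [pfxLoop, dif_neg (by omega)]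
      rw [List.drop_eq_nil_of_le (by omega)]
      simp [cp]

theorem sfxLoop_eq_pfx (a b : List Char) (hab : a.length ≤ b.length) :
    ∀ (n p s : Nat), a.length - p - s ≤ n →
      sfxLoop a b p s = pfxLoop ((a.drop p).reverse) b.reverse s := by
  intro n
  induction n with
  | zero =>
    intro p s hn
    rw [sfxLoop, dif_neg (by omega)]
    rw [pfxLoop, dif_neg (by simp; omega)]
  | succ n ih =>
    intro p s hn
    by_cases hs : s < a.length - p
    · have hXlen : ((a.drop p).reverse).length = a.length - p := by simp
      have hsX : s < ((a.drop p).reverse).length := by omega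
      have hsb : s < b.length := by omega
      have hsyr : s < b.reverse.length := by simpa using hsb
      have hia : a.length - 1 - s < a.length := by omega
      have hib : b.length - 1 - s < b.length := by omega
      have e1 : PySem.List.pyGetD ((a.drop p).reverse) (s : Int) ' ' =
          PySem.List.pyGetD a ((a.length - 1 - s : Nat) : Int) ' ' := by
        rw [PySem.List.pyGetD_natCast, PySem.List.pyGetD_natCast]
        rw [List.getD_eq_getElem _ _ hsX, List.getD_eq_getElem _ _ hia]
        rw [List.getElem_reverse]
        rw [List.getElem_drop]
        congr 1
        simp
        omega
      have e2 : PySem.List.pyGetD (b.reverse) (s : Int) ' ' =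
          PySem.List.pyGetD b ((b.length - 1 - s : Nat) : Int) ' ' := by
        rw [PySem.List.pyGetD_natCast, PySem.List.pyGetD_natCast]
        rw [List.getD_eq_getElem _ _ hsyr, List.getD_eq_getElem _ _ hib]
        rw [List.getElem_reverse]
      by_cases heq : PySem.List.pyGetD a ((a.length - 1 - s : Nat) : Int) ' ' =
          PySem.List.pyGetD b ((b.length - 1 - s : Nat) : Int) ' '
      · rw [sfxLoop, dif_pos ⟨hs, heq⟩]
        rw [pfxLoop, dif_pos ⟨hsX, by rw [e1, e2, heq]⟩]
        exact ih p (s + 1) (by omega)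
      · rw [sfxLoop, dif_neg (by exact fun h => heq h.2)]
        rw [pfxLoop, dif_neg (by rw [e1, e2]; exact fun h => heq h.2)]
    · rw [sfxLoop, dif_neg (by omega)]
      rw [pfxLoop, dif_neg (by simp; omega)]

-- both sides reduce to cp a b + cp ((a.drop (cp a b)).reverse) b.reverse
theorem main_eq (a b : List Char) (hab : a.length ≤ b.length) :
    ((blizLoop a b 1 - 1 : Nat) : Int) +
      ((blizLoop ((PySem.List.slice a (some ((blizLoop a b 1 - 1 : Nat) : Int)) none).reverse)
          b.reverse 1 - 1 : Nat) : Int)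
    = ((pfxLoop a b 0 : Nat) : Int) + ((sfxLoop a b (pfxLoop a b 0) 0 : Nat) : Int) := by
  have h1 : blizLoop a b 1 = cp a b + 1 :=
    blizLoop_eq a b hab (cp a b) 1 (by omega) (by omega)
  have hp : pfxLoop a b 0 = cp a b := by
    have := pfxLoop_eq a b hab a.length 0 (by omega)
    simpa using this
  have hc1 : blizLoop a b 1 - 1 = cp a b := by omega
  rw [hc1, hp]
  have hslice : PySem.List.slice a (some ((cp a b : Nat) : Int)) none = a.drop (cp a b) :=
    PySem.List.slice_from_natCast a (cp a b)
  rw [hslice]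
  have hX : ((a.drop (cp a b)).reverse).length ≤ b.reverse.length := by
    simp
    omega
  have h2 : blizLoop ((a.drop (cp a b)).reverse) b.reverse 1 =
      cp ((a.drop (cp a b)).reverse) b.reverse + 1 :=
    blizLoop_eq _ _ hX (cp ((a.drop (cp a b)).reverse) b.reverse) 1 (by omega) (by omega)
  have hsfx : sfxLoop a b (cp a b) 0 = cp ((a.drop (cp a b)).reverse) b.reverse := by
    rw [sfxLoop_eq_pfx a b hab a.length (cp a b) 0 (by omega)]
    have := pfxLoop_eq ((a.drop (cp a b)).reverse) b.reverse hX
      ((a.drop (cp a b)).reverse).length 0 (by omega)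
    simpa using this
  rw [hsfx]
  omega

-- ===== VERDICT (by name: the statement is the Claim_ definition above) =====
theorem bliz_spec : Claim_equal_bliz := by
  intro x y _
  unfold Spec_bliz bliz bliz_alt
  by_cases h : x.toList.length > y.toList.length
  · simp only [if_pos h]
    exact main_eq y.toList x.toList (by omega)
  · simp only [if_neg h]
    exact main_eq x.toList y.toList (by omega)
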